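-- pv_equiv track=rewrite | github.com/SFarhatComp/AdventOfCode | AOC - Q2.py | isAnotherPossible
-- ===== SOURCE A (Python) =====
-- def is_valid(numbers):
--         left_ptr = 0
--         right_ptr = 1
--         order_to_validate = numbers[left_ptr] < numbers[right_ptr]
--         is_valid = True
--         while right_ptr < len(numbers):
--             croissance_comp = (numbers[left_ptr] < numbers[right_ptr])
--             if ( croissance_comp != order_to_validate) or (abs(numbers[left_ptr] - numbers[right_ptr]) not in {1, 2, 3}):
--                 return False
--             left_ptr += 1
--             right_ptr += 1
--         return True
--
-- def isAnotherPossible(numbers):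
--
--     if is_valid(numbers):
--         return True
--
--     for i in range(len(numbers)):
--         modified_numbers = numbers[:i] + numbers[i+1:]
--         if is_valid(modified_numbers):
--             return True
--
--     return False
-- ===== SOURCE B (Python) =====
-- def isAnotherPossible(numbers):
--     # Single scan per direction: find the first bad adjacent pair; only removing
--     # one of its two endpoints can possibly repair that direction.
--     def first_bad(xs, lo, hi):
--         for i in range(len(xs) - 1):
--             d = xs[i + 1] - xs[i]
--             if not (lo <= d <= hi):
--                 return i
--         return None
--
--     def ok_dir(xs, lo, hi):
--         i = first_bad(xs, lo, hi)
--         if i is None: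
--             return True
--         for j in (i, i + 1):
--             ys = xs[:j] + xs[j + 1:]
--             if first_bad(ys, lo, hi) is None:
--                 return True
--         return False
--
--     return ok_dir(numbers, 1, 3) or ok_dir(numbers, -3, -1)
-- ===== Notes on version B (the rewrite author's own statement) =====
-- stated objective: faster
-- what changed: Instead of re-validating the whole list after deleting every index (O(n^2)), B scans once per monotone direction to the first bad adjacent pair and tests only the two removals (that pair's endpoints) that could repair that direction.
import Mathlib
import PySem

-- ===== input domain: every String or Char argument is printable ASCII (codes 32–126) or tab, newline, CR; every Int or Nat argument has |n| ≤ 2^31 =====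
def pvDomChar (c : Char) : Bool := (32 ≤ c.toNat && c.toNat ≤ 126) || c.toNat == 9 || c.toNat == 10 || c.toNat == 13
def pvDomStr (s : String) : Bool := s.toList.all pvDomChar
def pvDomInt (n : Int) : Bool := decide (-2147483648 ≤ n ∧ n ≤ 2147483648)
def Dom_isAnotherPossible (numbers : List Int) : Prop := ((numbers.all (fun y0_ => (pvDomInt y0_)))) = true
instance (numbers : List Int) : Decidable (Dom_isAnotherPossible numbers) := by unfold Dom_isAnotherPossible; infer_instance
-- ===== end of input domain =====

-- B replaces A's try-every-removal O(n^2) loop by one scan per direction to the first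
-- bad adjacent pair, testing only the two removals that can repair it: O(n).

-- ===== PORT A =====
-- the while loop of is_valid; left_ptr/right_ptr carried exactly as in the Python.
-- Indices are in range whenever left_ptr+1 = right_ptr < length, so `.getD 0` never
-- supplies its default on the executions the Python performs.
def pvIsValidLoop (numbers : List Int) (orderToValidate : Bool) (leftPtr rightPtr : Nat) : Bool :=
  if _h : rightPtr < numbers.length then
    let a := (PySem.List.pyGet? numbers (leftPtr : Int)).getD 0
    let b := (PySem.List.pyGet? numbers (rightPtr : Int)).getD 0
    let croissanceComp := decide (a < b)
    if croissanceComp ≠ orderToValidate ∨ ¬ (|a - b| = 1 ∨ |a - b| = 2 ∨ |a - b| = 3) then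
      false
    else
      pvIsValidLoop numbers orderToValidate (leftPtr + 1) (rightPtr + 1)
  else
    true
termination_by numbers.length - rightPtr

-- is_valid: reading numbers[0] / numbers[1] raises IndexError when the list has
-- fewer than 2 elements; `none` marks that exception.
def pvIsValid (numbers : List Int) : Option Bool :=
  match PySem.List.pyGet? numbers 0, PySem.List.pyGet? numbers 1 with
  | some a, some b => some (pvIsValidLoop numbers (decide (a < b)) 0 1)
  | _, _ => none

-- the for-loop over i in range(len(numbers)); `none` propagates an exception raised
-- by is_valid on a too-short modified list.
def pvTryRemovals (numbers : List Int) (i : Nat) : Option Bool :=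
  if _h : i < numbers.length then
    let modified := PySem.List.slice numbers none (some (i : Int)) ++
                    PySem.List.slice numbers (some ((i + 1 : Nat) : Int)) none
    match pvIsValid modified with
    | none => none
    | some true => some true
    | some false => pvTryRemovals numbers (i + 1)
  else some false
termination_by numbers.length - i

def isAnotherPossible (numbers : List Int) : Bool :=
  match pvIsValid numbers with
  | none => false        -- unreachable under Pre_: the Python raises here
  | some true => true
  | some false =>
    match pvTryRemovals numbers 0 with
    | none => false      -- unreachable under Pre_: the Python raises here
    | some b => b

-- ===== PORT B =====
-- first_bad: index of the first adjacent pair whose difference is outside [lo, hi]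
def pvFirstBad (lo hi : Int) : List Int → Option Nat
  | a :: b :: rest =>
    if lo ≤ b - a ∧ b - a ≤ hi then (pvFirstBad lo hi (b :: rest)).map (· + 1)
    else some 0
  | _ => none

-- ok_dir: xs[:j] + xs[j+1:] for the nonnegative j tried is exactly take/drop
def pvOkDir (xs : List Int) (lo hi : Int) : Bool :=
  match pvFirstBad lo hi xs with
  | none => true
  | some i =>
    if (pvFirstBad lo hi (xs.take i ++ xs.drop (i + 1))).isNone then true
    else if (pvFirstBad lo hi (xs.take (i + 1) ++ xs.drop (i + 2))).isNone then true
    else false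

def isAnotherPossible_alt (numbers : List Int) : Bool :=
  pvOkDir numbers 1 3 || pvOkDir numbers (-3) (-1)

-- ===== PRECONDITION & SPEC =====
-- Pre_ excludes exactly the inputs where the Python A raises IndexError: lists of
-- length ≤ 1, and length-2 lists whose only difference is invalid (the removal loop
-- then calls is_valid on a 1-element list).
def Pre_isAnotherPossible (numbers : List Int) : Prop :=
  3 ≤ numbers.length ∨
  (numbers.length = 2 ∧
    (|numbers.getD 0 0 - numbers.getD 1 0| = 1 ∨
     |numbers.getD 0 0 - numbers.getD 1 0| = 2 ∨
     |numbers.getD 0 0 - numbers.getD 1 0| = 3))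
instance (numbers : List Int) : Decidable (Pre_isAnotherPossible numbers) := by
  unfold Pre_isAnotherPossible; infer_instance

def pvWitness_isAnotherPossible : List Int := ([1, 2, 4])

def Spec_isAnotherPossible (numbers : List Int) (out : Bool) : Prop := out = isAnotherPossible_alt numbers
instance (numbers : List Int) (out : Bool) : Decidable (Spec_isAnotherPossible numbers out) := by unfold Spec_isAnotherPossible; infer_instance

-- ===== CLAIM (what is proved, stated in full; the proofs are below) =====
def Claim_equal_isAnotherPossible : Prop := ∀ (numbers : List Int), Dom_isAnotherPossible numbers → Pre_isAnotherPossible numbers → Spec_isAnotherPossible numbers (isAnotherPossible numbers)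

-- ===== LEMMAS AND PROOFS =====

-- adjacent pair k has a difference inside [lo, hi]
def GoodP (lo hi : Int) (x y : Int) : Prop := lo ≤ y - x ∧ y - x ≤ hi

-- every adjacent pair of xs is good
def AllGood (lo hi : Int) (xs : List Int) : Prop :=
  ∀ k, k + 1 < xs.length → GoodP lo hi (xs.getD k 0) (xs.getD (k + 1) 0)

-- the condition A's while loop demands of each adjacent pair, given the order bit
def CondP (order : Bool) (x y : Int) : Prop :=
  decide (x < y) = order ∧ (|x - y| = 1 ∨ |x - y| = 2 ∨ |x - y| = 3)

lemma allGood_nil (lo hi : Int) : AllGood lo hi [] := by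
  intro k hk; simp at hk

lemma allGood_single (lo hi : Int) (a : Int) : AllGood lo hi [a] := by
  intro k hk; simp at hk

lemma allGood_cons_cons (lo hi : Int) (a b : Int) (rest : List Int) :
    AllGood lo hi (a :: b :: rest) ↔ GoodP lo hi a b ∧ AllGood lo hi (b :: rest) := by
  constructor
  · intro h
    refine ⟨h 0 (by simp), ?_⟩
    intro k hk
    have := h (k + 1) (by simp at hk ⊢; omega)
    simpa using this
  · rintro ⟨h0, h⟩ k hk
    cases k with
    | zero => simpa using h0
    | succ k => simpa using h k (by simp at hk ⊢; omega)

lemma fb_none_iff (lo hi : Int) : ∀ xs : List Int, pvFirstBad lo hi xs = none ↔ AllGood lo hi xs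
  | [] => by simp [pvFirstBad, allGood_nil]
  | [a] => by simp [pvFirstBad, allGood_single]
  | a :: b :: rest => by
    rw [pvFirstBad, allGood_cons_cons]
    by_cases h : lo ≤ b - a ∧ b - a ≤ hi
    · rw [if_pos h, Option.map_eq_none_iff, fb_none_iff lo hi (b :: rest)]
      constructor
      · intro hrest; exact ⟨h, hrest⟩
      · intro hrest; exact hrest.2
    · rw [if_neg h]
      constructor
      · intro hcontra; simp at hcontra
      · rintro ⟨hg, _⟩; exact absurd hg h

lemma fb_some_bad (lo hi : Int) : ∀ (xs : List Int) (i : Nat), pvFirstBad lo hi xs = some i →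
    i + 1 < xs.length ∧ ¬ GoodP lo hi (xs.getD i 0) (xs.getD (i + 1) 0)
  | [], i => by simp [pvFirstBad]
  | [a], i => by simp [pvFirstBad]
  | a :: b :: rest, i => by
    rw [pvFirstBad]
    by_cases h : lo ≤ b - a ∧ b - a ≤ hi
    · simp only [if_pos h, Option.map_eq_some_iff]
      rintro ⟨j, hj, rfl⟩
      have := fb_some_bad lo hi (b :: rest) j hj
      constructor
      · simp at this ⊢; omega
      · simpa using this.2
    · simp only [if_neg h, Option.some.injEq]
      rintro rfl
      refine ⟨by simp, ?_⟩
      simpa [GoodP] using h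

-- the element-wise description of a one-element removal
lemma erase_getD (xs : List Int) (j k : Nat) (hj : j < xs.length) (hk : k + 1 < xs.length) :
    (xs.take j ++ xs.drop (j + 1)).getD k 0 =
      if k < j then xs.getD k 0 else xs.getD (k + 1) 0 := by
  rw [← List.eraseIdx_eq_take_drop_succ]
  have hlen : (xs.eraseIdx j).length = xs.length - 1 := by
    rw [List.length_eraseIdx]; simp [hj]
  have hk' : k < (xs.eraseIdx j).length := by omega
  rw [List.getD_eq_getElem _ _ hk', List.getElem_eraseIdx]
  split
  · rw [List.getD_eq_getElem _ _ (by omega)]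
  · rw [List.getD_eq_getElem _ _ (by omega)]

lemma erase_length (xs : List Int) (j : Nat) (hj : j < xs.length) :
    (xs.take j ++ xs.drop (j + 1)).length = xs.length - 1 := by
  rw [← List.eraseIdx_eq_take_drop_succ, List.length_eraseIdx]; simp [hj]

-- a bad pair away from the removal point survives the removal
lemma survive (lo hi : Int) (xs : List Int) (i j : Nat)
    (hi1 : i + 1 < xs.length) (hj : j < xs.length) (hji : j ≠ i) (hji1 : j ≠ i + 1)
    (h : AllGood lo hi (xs.take j ++ xs.drop (j + 1))) :
    GoodP lo hi (xs.getD i 0) (xs.getD (i + 1) 0) := by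
  have hlen := erase_length xs j hj
  rcases Nat.lt_or_ge j i with hlt | hge
  · -- j < i : positions i-1, i of the shortened list are xs[i], xs[i+1]
    have hk : (i - 1) + 1 < (xs.take j ++ xs.drop (j + 1)).length := by omega
    have := h (i - 1) hk
    rw [erase_getD xs j (i - 1) hj (by omega), erase_getD xs j ((i - 1) + 1) hj (by omega)] at this
    have e1 : ¬ (i - 1 < j) := by omega
    have e2 : ¬ ((i - 1) + 1 < j) := by omega
    rw [if_neg e1, if_neg e2] at this
    have e3 : (i - 1) + 1 = i := by omega
    rwa [e3] at this
  · -- i + 1 < j : positions i, i+1 are untouched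
    have hij : i + 1 < j := by omega
    have hk : i + 1 < (xs.take j ++ xs.drop (j + 1)).length := by omega
    have := h i hk
    rw [erase_getD xs j i hj (by omega), erase_getD xs j (i + 1) hj (by omega)] at this
    rwa [if_pos (by omega), if_pos (by omega)] at this

-- B, one direction: true iff the full list is good or some single removal makes it good
lemma okDir_iff (lo hi : Int) (xs : List Int) :
    pvOkDir xs lo hi = true ↔
      (AllGood lo hi xs ∨ ∃ j, j < xs.length ∧ AllGood lo hi (xs.take j ++ xs.drop (j + 1))) := by
  cases hfb : pvFirstBad lo hi xs with
  | none =>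
    constructor
    · intro _
      exact Or.inl ((fb_none_iff lo hi xs).1 hfb)
    · intro _
      unfold pvOkDir; rw [hfb]
  | some i =>
    obtain ⟨hi1, hbad⟩ := fb_some_bad lo hi xs i hfb
    have hred : pvOkDir xs lo hi =
        (if (pvFirstBad lo hi (xs.take i ++ xs.drop (i + 1))).isNone then true
         else if (pvFirstBad lo hi (xs.take (i + 1) ++ xs.drop (i + 2))).isNone then true
         else false) := by
      unfold pvOkDir; rw [hfb]
    rw [hred]
    constructor
    · intro h
      by_cases h1 : pvFirstBad lo hi (xs.take i ++ xs.drop (i + 1)) = none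
      · exact Or.inr ⟨i, by omega, (fb_none_iff lo hi _).1 h1⟩
      · by_cases h2 : pvFirstBad lo hi (xs.take (i + 1) ++ xs.drop (i + 2)) = none
        · exact Or.inr ⟨i + 1, by omega, (fb_none_iff lo hi _).1 h2⟩
        · rw [if_neg (by simp [h1]), if_neg (by simp [h2])] at h
          exact absurd h (by simp)
    · rintro (hfull | ⟨j, hjlen, hj⟩)
      · exact absurd (hfull i hi1) hbad
      · by_cases hji : j = i
        · subst hji
          rw [if_pos (by simp [(fb_none_iff lo hi _).2 hj])]
        · by_cases hji1 : j = i + 1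
          · subst hji1
            by_cases h1 : (pvFirstBad lo hi (xs.take i ++ xs.drop (i + 1))).isNone
            · rw [if_pos h1]
            · rw [if_neg h1,
                if_pos (by simp [(fb_none_iff lo hi _).2
                  (show AllGood lo hi (xs.take (i + 1) ++ xs.drop (i + 1 + 1)) from hj)])]
          · exact absurd (survive lo hi xs i j hi1 hjlen hji hji1 hj) hbad

-- characterisation of the pair condition A's loop checks, by the order bit
lemma condP_true_iff (x y : Int) : CondP true x y ↔ GoodP 1 3 x y := by
  unfold CondP GoodP
  by_cases h : x ≤ y
  · rw [abs_of_nonpos (by omega)]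
    simp only [decide_eq_true_iff]
    omega
  · rw [abs_of_pos (by omega)]
    simp only [decide_eq_true_iff]
    omega

lemma condP_false_iff (x y : Int) : CondP false x y ↔ GoodP (-3) (-1) x y := by
  unfold CondP GoodP
  by_cases h : x ≤ y
  · rw [abs_of_nonpos (by omega)]
    simp only [decide_eq_false_iff_not]
    omega
  · rw [abs_of_pos (by omega)]
    simp only [decide_eq_false_iff_not]
    omega

lemma pyGet_getD (xs : List Int) (k : Nat) (hk : k < xs.length) :
    PySem.List.pyGet? xs (k : Int) = some (xs.getD k 0) := by
  simp [pysem, hk, List.getD_eq_getElem]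

-- A's while loop, from pointer position l, checks exactly the pairs from index l on
lemma loop_spec (xs : List Int) (order : Bool) :
    ∀ n l, xs.length - l ≤ n →
      (pvIsValidLoop xs order l (l + 1) = true ↔
        ∀ k, l ≤ k → k + 1 < xs.length → CondP order (xs.getD k 0) (xs.getD (k + 1) 0)) := by
  intro n
  induction n with
  | zero =>
    intro l hl
    rw [pvIsValidLoop]
    rw [dif_neg (by omega)]
    simp only [true_iff]
    intro k hk hk1; omega
  | succ n ih =>
    intro l hl
    rw [pvIsValidLoop]
    by_cases h : l + 1 < xs.length
    · rw [dif_pos h]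
      have ha : PySem.List.pyGet? xs (l : Int) = some (xs.getD l 0) :=
        pyGet_getD xs l (by omega)
      have hb : PySem.List.pyGet? xs ((l + 1 : Nat) : Int) = some (xs.getD (l + 1) 0) :=
        pyGet_getD xs (l + 1) h
      rw [ha, hb]
      simp only [Option.getD_some]
      by_cases hc : CondP order (xs.getD l 0) (xs.getD (l + 1) 0)
      · rw [if_neg]
        · rw [ih (l + 1) (by omega)]
          constructor
          · intro hall k hk hk1
            rcases Nat.eq_or_lt_of_le hk with rfl | hk'
            · exact hc
            · exact hall k (by omega) hk1
          · intro hall k hk hk1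
            exact hall k (by omega) hk1
        · unfold CondP at hc
          push Not
          constructor
          · simpa using hc.1
          · exact hc.2
      · rw [if_pos]
        · simp only [Bool.false_eq_true, false_iff]
          intro hall
          exact hc (hall l (le_refl l) h)
        · unfold CondP at hc
          by_cases h1 : decide (xs.getD l 0 < xs.getD (l + 1) 0) = order
          · right
            intro hdiff
            exact hc ⟨h1, hdiff⟩
          · left; exact h1
    · rw [dif_neg h]
      simp only [true_iff]
      intro k hk hk1; omega

-- is_valid of a list of length ≥ 2: true iff all-increasing-by-1..3 or all-decreasing-by-1..3
lemma valid_true_iff (xs : List Int) (h2 : 2 ≤ xs.length) :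
    pvIsValid xs = some true ↔ (AllGood 1 3 xs ∨ AllGood (-3) (-1) xs) := by
  have h0 : PySem.List.pyGet? xs 0 = some (xs.getD 0 0) := by
    simpa using pyGet_getD xs 0 (by omega)
  have h1 : PySem.List.pyGet? xs 1 = some (xs.getD 1 0) := by
    simpa using pyGet_getD xs 1 (by omega)
  unfold pvIsValid
  rw [h0, h1]
  simp only [Option.some.injEq]
  have hloop := loop_spec xs (decide (xs.getD 0 0 < xs.getD 1 0)) (xs.length) 0 (by omega)
  by_cases hx : xs.getD 0 0 < xs.getD 1 0
  · rw [show decide (xs.getD 0 0 < xs.getD 1 0) = true by simpa using hx] at hloop ⊢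
    rw [hloop]
    constructor
    · intro hall
      left
      intro k hk
      exact (condP_true_iff _ _).1 (hall k (Nat.zero_le k) hk)
    · rintro (hall | hall)
      · intro k _ hk
        exact (condP_true_iff _ _).2 (hall k hk)
      · exfalso
        have := hall 0 (by omega)
        unfold GoodP at this
        simp only [Nat.zero_add] at this
        omega
  · rw [show decide (xs.getD 0 0 < xs.getD 1 0) = false by simpa using hx] at hloop ⊢
    rw [hloop]
    constructor
    · intro hall
      right
      intro k hk
      exact (condP_false_iff _ _).1 (hall k (Nat.zero_le k) hk)
    · rintro (hall | hall)
      · exfalso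
        have := hall 0 (by omega)
        unfold GoodP at this
        simp only [Nat.zero_add] at this
        omega
      · intro k _ hk
        exact (condP_false_iff _ _).2 (hall k hk)

lemma valid_ne_none (xs : List Int) (h2 : 2 ≤ xs.length) : pvIsValid xs ≠ none := by
  unfold pvIsValid
  have h0 : PySem.List.pyGet? xs 0 = some (xs.getD 0 0) := by
    simpa using pyGet_getD xs 0 (by omega)
  have h1 : PySem.List.pyGet? xs 1 = some (xs.getD 1 0) := by
    simpa using pyGet_getD xs 1 (by omega)
  rw [h0, h1]
  simp

lemma valid_false_iff (xs : List Int) (h2 : 2 ≤ xs.length) :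
    pvIsValid xs = some false ↔ ¬ (AllGood 1 3 xs ∨ AllGood (-3) (-1) xs) := by
  cases hv : pvIsValid xs with
  | none => exact absurd hv (valid_ne_none xs h2)
  | some b =>
    cases b with
    | false =>
      simp only [Option.some.injEq, true_iff]
      intro hcontra
      have := (valid_true_iff xs h2).2 hcontra
      rw [hv] at this
      simp at this
    | true =>
      simp only [Option.some.injEq, Bool.true_eq_false, false_iff, not_not]
      exact (valid_true_iff xs h2).1 hv

-- the removal loop of A, from index i on
-- the removal loop past the last index returns False
lemma tr_stop (xs : List Int) (i : Nat) (h : ¬ i < xs.length) :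
    pvTryRemovals xs i = some false := by
  rw [pvTryRemovals, dif_neg h]

-- one unfolding step of the removal loop
lemma tr_unfold (xs : List Int) (i : Nat) (h : i < xs.length) :
    pvTryRemovals xs i =
      match pvIsValid (PySem.List.slice xs none (some (i : Int)) ++
                       PySem.List.slice xs (some ((i + 1 : Nat) : Int)) none) with
      | none => none
      | some true => some true
      | some false => pvTryRemovals xs (i + 1) := by
  rw [pvTryRemovals, dif_pos h]

lemma tr_spec (xs : List Int) (h3 : 3 ≤ xs.length) :
    ∀ n i, xs.length - i ≤ n →
      pvTryRemovals xs i ≠ none ∧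
      (pvTryRemovals xs i = some true ↔
        ∃ j, i ≤ j ∧ j < xs.length ∧
          (AllGood 1 3 (xs.take j ++ xs.drop (j + 1)) ∨
           AllGood (-3) (-1) (xs.take j ++ xs.drop (j + 1)))) := by
  intro n
  induction n with
  | zero =>
    intro i hn
    rw [tr_stop xs i (by omega)]
    refine ⟨by simp, ?_⟩
    simp only [Option.some.injEq, Bool.false_eq_true, false_iff]
    rintro ⟨j, hij, hjlen, _⟩; omega
  | succ n ih =>
    intro i hn
    by_cases h : i < xs.length
    · have hslice : PySem.List.slice xs none (some (i : Int)) ++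
          PySem.List.slice xs (some ((i + 1 : Nat) : Int)) none =
          xs.take i ++ xs.drop (i + 1) := by
        rw [PySem.List.slice_to_natCast, PySem.List.slice_from_natCast]
      rw [tr_unfold xs i h, hslice]
      have hlen : (xs.take i ++ xs.drop (i + 1)).length = xs.length - 1 :=
        erase_length xs i h
      have h2 : 2 ≤ (xs.take i ++ xs.drop (i + 1)).length := by omega
      cases hv : pvIsValid (xs.take i ++ xs.drop (i + 1)) with
      | none => exact absurd hv (valid_ne_none _ h2)
      | some b =>
        cases b with
        | true =>
          refine ⟨by simp, ?_⟩
          simp only [Option.some.injEq, true_iff]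
          exact ⟨i, le_refl i, h, (valid_true_iff _ h2).1 hv⟩
        | false =>
          have hnotI := (valid_false_iff _ h2).1 hv
          obtain ⟨ihne, ihiff⟩ := ih (i + 1) (by omega)
          refine ⟨ihne, ?_⟩
          show pvTryRemovals xs (i + 1) = some true ↔
            ∃ j, i ≤ j ∧ j < xs.length ∧
              (AllGood 1 3 (xs.take j ++ xs.drop (j + 1)) ∨
               AllGood (-3) (-1) (xs.take j ++ xs.drop (j + 1)))
          rw [ihiff]
          constructor
          · rintro ⟨j, hij, hjlen, hgood⟩
            exact ⟨j, by omega, hjlen, hgood⟩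
          · rintro ⟨j, hij, hjlen, hgood⟩
            rcases Nat.eq_or_lt_of_le hij with rfl | hij'
            · exact absurd hgood hnotI
            · exact ⟨j, by omega, hjlen, hgood⟩
    · rw [tr_stop xs i h]
      refine ⟨by simp, ?_⟩
      simp only [Option.some.injEq, Bool.false_eq_true, false_iff]
      rintro ⟨j, hij, hjlen, _⟩; omega

-- A, for length ≥ 3: true iff the full list or some single removal is valid
lemma a_true_iff (xs : List Int) (h3 : 3 ≤ xs.length) :
    isAnotherPossible xs = true ↔
      ((AllGood 1 3 xs ∨ AllGood (-3) (-1) xs) ∨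
       ∃ j, j < xs.length ∧
         (AllGood 1 3 (xs.take j ++ xs.drop (j + 1)) ∨
          AllGood (-3) (-1) (xs.take j ++ xs.drop (j + 1)))) := by
  unfold isAnotherPossible
  cases hv : pvIsValid xs with
  | none => exact absurd hv (valid_ne_none xs (by omega))
  | some b =>
    cases b with
    | true =>
      simp only [true_iff]
      exact Or.inl ((valid_true_iff xs (by omega)).1 hv)
    | false =>
      have hnotfull := (valid_false_iff xs (by omega)).1 hv
      obtain ⟨hne, hiff⟩ := tr_spec xs h3 xs.length 0 (by omega)
      cases htr : pvTryRemovals xs 0 with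
      | none => exact absurd htr hne
      | some b' =>
        rw [htr] at hiff
        cases b' with
        | true =>
          simp only [true_iff]
          obtain ⟨j, _, hjlen, hgood⟩ := hiff.1 rfl
          exact Or.inr ⟨j, hjlen, hgood⟩
        | false =>
          simp only [Bool.false_eq_true, false_iff]
          rintro (hfull | ⟨j, hjlen, hgood⟩)
          · exact hnotfull hfull
          · exact absurd (hiff.2 ⟨j, Nat.zero_le j, hjlen, hgood⟩) (by simp)

-- B: true iff the full list or some single removal is valid
lemma b_true_iff (xs : List Int) :
    isAnotherPossible_alt xs = true ↔
      ((AllGood 1 3 xs ∨ AllGood (-3) (-1) xs) ∨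
       ∃ j, j < xs.length ∧
         (AllGood 1 3 (xs.take j ++ xs.drop (j + 1)) ∨
          AllGood (-3) (-1) (xs.take j ++ xs.drop (j + 1)))) := by
  unfold isAnotherPossible_alt
  rw [Bool.or_eq_true, okDir_iff, okDir_iff]
  constructor
  · rintro ((h | ⟨j, hj, hg⟩) | (h | ⟨j, hj, hg⟩))
    · exact Or.inl (Or.inl h)
    · exact Or.inr ⟨j, hj, Or.inl hg⟩
    · exact Or.inl (Or.inr h)
    · exact Or.inr ⟨j, hj, Or.inr hg⟩
  · rintro ((h | h) | ⟨j, hj, hg | hg⟩)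
    · exact Or.inl (Or.inl h)
    · exact Or.inr (Or.inl h)
    · exact Or.inl (Or.inr ⟨j, hj, hg⟩)
    · exact Or.inr (Or.inr ⟨j, hj, hg⟩)

-- ===== VERDICT (by name: the statement is the Claim_ definition above) =====
theorem isAnotherPossible_spec : Claim_equal_isAnotherPossible := by
  intro xs _hdom hpre
  unfold Spec_isAnotherPossible
  rw [Bool.eq_iff_iff]
  rcases hpre with h3 | ⟨h2, hdiff⟩
  · rw [a_true_iff xs h3, b_true_iff xs]
  · -- length 2 with a valid pair: both sides are true
    have hgood : AllGood 1 3 xs ∨ AllGood (-3) (-1) xs := by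
      by_cases hx : xs.getD 0 0 < xs.getD 1 0
      · left
        intro k hk
        have hk0 : k = 0 := by omega
        subst hk0
        show GoodP 1 3 (xs.getD 0 0) (xs.getD 1 0)
        unfold GoodP
        rcases hdiff with h | h | h <;> rw [abs_of_nonpos (by omega)] at h <;> omega
      · right
        intro k hk
        have hk0 : k = 0 := by omega
        subst hk0
        show GoodP (-3) (-1) (xs.getD 0 0) (xs.getD 1 0)
        unfold GoodP
        rcases hdiff with h | h | h <;> rw [abs_of_nonneg (by omega)] at h <;> omega
    constructor
    · intro _
      exact (b_true_iff xs).2 (Or.inl hgood)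
    · intro _
      unfold isAnotherPossible
      rw [(valid_true_iff xs (by omega)).2 hgood]
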